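-- pv_equiv track=rewrite | github.com/Hulyamr13/hackerrank | Solve Equations.py | solve
-- ===== SOURCE A (Python) =====
-- def one_solution(a, b, c):
--     # find a pair of x, y such that x, y both integer, a*x + b*y = c
--     A, B = a, b
--     x = [1, 0, 0, 1]
--     # a = a * x[0] + b * x[1]
--     # b = a * x[2] + b * x[3]
--     while b != 0:
--         # a' = b
--         # b' = a % b = a - (a // b) * b = a - q * b
--         q = a // b
--         a, b = b, a % b
--         x = [x[2], x[3], x[0] - q * x[2], x[1] - q * x[3]]
--     # now a == gcd(A, B) = A * x[0] + B * x[1]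
--     assert c % a == 0  # otherwise it's impossible
--     q = c // a
--     return q * x[0], q * x[1], a
--
-- def solve_y(a, b, c, x):
--     return (c - a * x) // b
--
-- def sum_square(a, b):
--     return a * a + b * b
--
-- def solve(a, b, c):
--     x_0 = (a * c) // sum_square(a, b)
--
--     x, y, g = one_solution(a, b, c)
--     step_x = b // g  # the minimum step of x
--     dist = ((x_0 - x) // step_x) * step_x
--     x_smaller = x + dist
--     while x_smaller + step_x <= x_0:
--         x_smaller += dist
--     x_bigger = x_smaller + step_x
--     y_bigger = solve_y(a, b, c, x_bigger)
--     y_smaller = solve_y(a, b, c, x_smaller)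
--     if x_smaller > 0:
--         if sum_square(x_bigger, y_bigger) < sum_square(x_smaller, y_smaller):
--             return [x_bigger, y_bigger]
--         else:
--             return [x_smaller, y_smaller]
--     else:
--         return [x_bigger, y_bigger]
-- ===== SOURCE B (Python) =====
-- def extgcd(a, b):
--     # recursive extended Euclid with Python floor division:
--     # returns (g, x, y) with a*x + b*y == g, same g and coefficients as the
--     # iterative matrix formulation (same quotient sequence).
--     if b == 0:
--         return a, 1, 0
--     g, x, y = extgcd(b, a % b)
--     return g, y, x - (a // b) * y
--
-- def solve(a, b, c):
--     g, x, y = extgcd(a, b)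
--     q = c // g
--     x *= q
--     step = b // g                      # positive whenever b != 0
--     x_0 = (a * c) // (a * a + b * b)   # x of the foot of the perpendicular, floored
--     x_smaller = x_0 - (x_0 - x) % step # largest solution x with x <= x_0
--     x_bigger = x_smaller + step
--     y_smaller = (c - a * x_smaller) // b
--     y_bigger = (c - a * x_bigger) // b
--     if x_smaller > 0:
--         if x_bigger * x_bigger + y_bigger * y_bigger < x_smaller * x_smaller + y_smaller * y_smaller:
--             return [x_bigger, y_bigger]
--         return [x_smaller, y_smaller]
--     return [x_bigger, y_bigger]
-- ===== Notes on version B (the rewrite author's own statement) =====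
-- stated objective: simpler
-- what changed: Replaces the iterative 2x2-matrix extended Euclid with the standard recursive extgcd, drops the dead while-loop (its condition is always false since step = b//g > 0), and computes x_smaller with a single mod instead of a floordiv-multiply.
import Mathlib
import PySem

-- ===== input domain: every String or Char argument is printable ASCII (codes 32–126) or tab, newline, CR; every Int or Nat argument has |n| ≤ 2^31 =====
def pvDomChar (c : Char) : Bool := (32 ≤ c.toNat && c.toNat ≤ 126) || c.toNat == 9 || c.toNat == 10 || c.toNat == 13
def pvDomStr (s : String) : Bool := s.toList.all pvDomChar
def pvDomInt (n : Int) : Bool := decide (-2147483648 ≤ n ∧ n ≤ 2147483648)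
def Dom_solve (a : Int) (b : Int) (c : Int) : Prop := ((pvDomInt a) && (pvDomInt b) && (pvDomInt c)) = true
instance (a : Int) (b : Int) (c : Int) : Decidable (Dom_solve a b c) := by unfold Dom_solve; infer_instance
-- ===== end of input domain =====

-- B replaces A's iterative 2x2-matrix extended Euclid by the standard recursive one and
-- drops A's dead while-loop, computing x_smaller by a single mod; objective: simpler.

-- termination helper for both Euclid recursions (Python mod shrinks |b|)
theorem pvMod_natAbs_lt (a b : Int) (h : b ≠ 0) : (PySem.Int.mod a b).natAbs < b.natAbs := by
  rcases lt_trichotomy b 0 with hb | hb | hb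
  · have := PySem.Int.mod_neg_bounds a hb; omega
  · omega
  · have h1 := PySem.Int.mod_nonneg a hb
    have h2 := PySem.Int.mod_lt a hb
    omega

-- ===== PORT A =====
-- the while-loop of one_solution, carrying the 2x2 matrix x = [x0, x1, x2, x3]
def euclidA (a b x0 x1 x2 x3 : Int) : Int × Int × Int :=
  if hb : b = 0 then (a, x0, x1)
  else
    let q := PySem.Int.floordiv a b
    euclidA b (PySem.Int.mod a b) x2 x3 (x0 - q * x2) (x1 - q * x3)
termination_by b.natAbs
decreasing_by exact pvMod_natAbs_lt a b hb

-- one_solution; the Python assert raises outside Pre_solve, where nothing is claimed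
def oneSolution (a b c : Int) : Int × Int × Int :=
  match euclidA a b 1 0 0 1 with
  | (g, u, v) =>
    let q := PySem.Int.floordiv c g
    (q * u, q * v, g)

def solveY (a b c x : Int) : Int := PySem.Int.floordiv (c - a * x) b

def sumSquare (a b : Int) : Int := a * a + b * b

-- the 'while x_smaller + step_x <= x_0' loop, fuel-guarded (a pure totality guard:
-- inside Pre_solve the condition is false at the first test)
def whileA : Nat → Int → Int → Int → Int → Int
  | 0, xs, _, _, _ => xs
  | n + 1, xs, step, x0, dist =>
    if xs + step ≤ x0 then whileA n (xs + dist) step x0 dist else xs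

def solve (a : Int) (b : Int) (c : Int) : List Int :=
  let x_0 := PySem.Int.floordiv (a * c) (sumSquare a b)
  match oneSolution a b c with
  | (x, _y, g) =>
    let step_x := PySem.Int.floordiv b g
    let dist := (PySem.Int.floordiv (x_0 - x) step_x) * step_x
    let x_smaller := whileA 1000000 (x + dist) step_x x_0 dist
    let x_bigger := x_smaller + step_x
    let y_bigger := solveY a b c x_bigger
    let y_smaller := solveY a b c x_smaller
    if x_smaller > 0 then
      if sumSquare x_bigger y_bigger < sumSquare x_smaller y_smaller then
        [x_bigger, y_bigger]
      else
        [x_smaller, y_smaller]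
    else
      [x_bigger, y_bigger]

-- ===== PORT B =====
def extgcdB (a b : Int) : Int × Int × Int :=
  if hb : b = 0 then (a, 1, 0)
  else
    match extgcdB b (PySem.Int.mod a b) with
    | (g, x, y) => (g, y, x - PySem.Int.floordiv a b * y)
termination_by b.natAbs
decreasing_by exact pvMod_natAbs_lt a b hb

def solve_alt (a : Int) (b : Int) (c : Int) : List Int :=
  match extgcdB a b with
  | (g, x1, _y1) =>
    let q := PySem.Int.floordiv c g
    let x := x1 * q
    let step := PySem.Int.floordiv b g
    let x_0 := PySem.Int.floordiv (a * c) (a * a + b * b)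
    let x_smaller := x_0 - PySem.Int.mod (x_0 - x) step
    let x_bigger := x_smaller + step
    let y_smaller := PySem.Int.floordiv (c - a * x_smaller) b
    let y_bigger := PySem.Int.floordiv (c - a * x_bigger) b
    if x_smaller > 0 then
      if x_bigger * x_bigger + y_bigger * y_bigger < x_smaller * x_smaller + y_smaller * y_smaller then
        [x_bigger, y_bigger]
      else
        [x_smaller, y_smaller]
    else
      [x_bigger, y_bigger]

-- ===== PRECONDITION & SPEC =====
-- Pre_ excludes exactly the inputs where Python A raises: b = 0 (ZeroDivisionError in
-- 'b // g' / '... // step_x' or 'c % 0') and gcd(a,b) ∤ c (the AssertionError in one_solution).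
def Pre_solve (a : Int) (b : Int) (c : Int) : Prop := b ≠ 0 ∧ ((Int.gcd a b : Int) ∣ c)
instance (a : Int) (b : Int) (c : Int) : Decidable (Pre_solve a b c) := by unfold Pre_solve; infer_instance
def pvWitness_solve : Int × Int × Int := (3, 5, 7)

def Spec_solve (a : Int) (b : Int) (c : Int) (out : List Int) : Prop := out = solve_alt a b c
instance (a : Int) (b : Int) (c : Int) (out : List Int) : Decidable (Spec_solve a b c out) := by unfold Spec_solve; infer_instance

-- ===== CLAIM (what is proved, stated in full; the proofs are below) =====
def Claim_equal_solve : Prop := ∀ (a : Int) (b : Int) (c : Int), Dom_solve a b c → Pre_solve a b c → Spec_solve a b c (solve a b c)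

-- ===== LEMMAS AND PROOFS =====

-- the iterative matrix Euclid computes the recursive extgcd, combined through the carried matrix
theorem euclidA_eq_extgcdB (n : Nat) : ∀ (a b x0 x1 x2 x3 : Int), b.natAbs ≤ n →
    euclidA a b x0 x1 x2 x3 =
      (match extgcdB a b with
       | (g, x, y) => (g, x * x0 + y * x2, x * x1 + y * x3)) := by
  induction n with
  | zero =>
    intro a b x0 x1 x2 x3 hn
    have hb : b = 0 := by omega
    subst hb
    simp [euclidA, extgcdB]
  | succ n ih =>
    intro a b x0 x1 x2 x3 hn
    by_cases hb : b = 0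
    · subst hb; simp [euclidA, extgcdB]
    · rw [euclidA, extgcdB]
      simp only [hb, dite_false]
      have hlt := pvMod_natAbs_lt a b hb
      rw [ih b (PySem.Int.mod a b) _ _ _ _ (by omega)]
      rcases hE : extgcdB b (PySem.Int.mod a b) with ⟨g, x, y⟩
      simp only
      ring_nf

-- g = first component of extgcdB: divides both arguments and has the sign of b (b ≠ 0)
theorem extgcdB_fst (n : Nat) : ∀ (a b : Int), b ≠ 0 → b.natAbs ≤ n →
    (extgcdB a b).1 ∣ b ∧ (extgcdB a b).1 ∣ a ∧
      (0 < b → 0 < (extgcdB a b).1) ∧ (b < 0 → (extgcdB a b).1 < 0) := by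
  induction n with
  | zero => intro a b hb hn; omega
  | succ n ih =>
    intro a b hb hn
    rw [extgcdB]; simp only [hb, dite_false]
    by_cases hm : PySem.Int.mod a b = 0
    · have hdvd : b ∣ a := (PySem.Int.mod_eq_zero_iff_dvd a b).mp hm
      have hE0 : extgcdB b (PySem.Int.mod a b) = (b, 1, 0) := by
        rw [hm, extgcdB]; simp
      rw [hE0]
      exact ⟨dvd_refl b, hdvd, fun h => h, fun h => h⟩
    · have hlt := pvMod_natAbs_lt a b hb
      have := ih b (PySem.Int.mod a b) hm (by omega)
      rcases hE : extgcdB b (PySem.Int.mod a b) with ⟨g, x, y⟩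
      rw [hE] at this
      obtain ⟨hgm, hgb, hpos, hneg⟩ := this
      simp only
      have hga : g ∣ a := by
        have hid := PySem.Int.floordiv_mul_add_mod a b
        have : a = PySem.Int.floordiv a b * b + PySem.Int.mod a b := hid.symm
        rw [this]
        exact dvd_add (Dvd.dvd.mul_left hgb _) hgm
      refine ⟨hgb, hga, ?_, ?_⟩
      · intro h
        apply hpos
        have := PySem.Int.mod_nonneg a h
        omega
      · intro h
        apply hneg
        have := (PySem.Int.mod_neg_bounds a h).2
        omega

-- exact division with matching signs: b // g is positive
theorem step_pos (b g : Int) (hb : b ≠ 0) (hdvd : g ∣ b)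
    (hsgn : (0 < b → 0 < g) ∧ (b < 0 → g < 0)) : 0 < PySem.Int.floordiv b g := by
  obtain ⟨k, hk⟩ := hdvd
  rcases lt_trichotomy b 0 with h | h | h
  · have hg : g < 0 := hsgn.2 h
    have hk' : 0 < k := by
      rcases lt_trichotomy k 0 with hk0 | hk0 | hk0
      · exfalso; nlinarith [mul_pos_of_neg_of_neg hg hk0]
      · exfalso; rw [hk0, mul_zero] at hk; exact hb hk
      · exact hk0
    rw [← PySem.Int.floordiv_neg_neg]
    rw [PySem.Int.floordiv_eq_ediv_of_pos (by omega : (0:Int) < -g)]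
    have hnb : -b = -g * k := by rw [hk]; ring
    rw [hnb, Int.mul_ediv_cancel_left k (by omega : (-g) ≠ 0)]
    exact hk'
  · omega
  · have hg : 0 < g := hsgn.1 h
    have hk' : 0 < k := by
      rcases lt_trichotomy k 0 with hk0 | hk0 | hk0
      · exfalso; nlinarith [mul_neg_of_pos_of_neg hg hk0]
      · exfalso; rw [hk0, mul_zero] at hk; exact hb hk
      · exact hk0
    rw [PySem.Int.floordiv_eq_ediv_of_pos hg, hk,
      Int.mul_ediv_cancel_left k (by omega : g ≠ 0)]
    exact hk'

-- the while loop exits at once when step > 0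
theorem whileA_noop (n : Nat) (xs step x0 dist : Int) (h : ¬ (xs + step ≤ x0)) :
    whileA n xs step x0 dist = xs := by
  cases n with
  | zero => rfl
  | succ n => simp [whileA, h]

-- ===== VERDICT (by name: the statement is the Claim_ definition above) =====
theorem solve_spec : Claim_equal_solve := by
  intro a b c _hdom hpre
  obtain ⟨hb, _hdvd⟩ := hpre
  unfold Spec_solve solve solve_alt oneSolution solveY sumSquare
  rw [euclidA_eq_extgcdB b.natAbs a b 1 0 0 1 le_rfl]
  rcases hE : extgcdB a b with ⟨g, x1, y1⟩
  have hfst := extgcdB_fst b.natAbs a b hb le_rfl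
  rw [hE] at hfst
  obtain ⟨hgb, hga, hpos, hneg⟩ := hfst
  have hstep : 0 < PySem.Int.floordiv b g := step_pos b g hb hgb ⟨hpos, hneg⟩
  simp only
  have hxq : PySem.Int.floordiv c g * (x1 * 1 + y1 * 0) = x1 * PySem.Int.floordiv c g := by
    ring
  rw [hxq]
  set q := PySem.Int.floordiv c g with hq
  set s := PySem.Int.floordiv b g with hs
  set x0 := PySem.Int.floordiv (a * c) (a * a + b * b) with hx0
  set x := x1 * q with hx
  -- A's candidate (fdiv form) equals B's candidate (mod form)
  have hxs : x + PySem.Int.floordiv (x0 - x) s * s = x0 - PySem.Int.mod (x0 - x) s := by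
    have := PySem.Int.floordiv_mul_add_mod (x0 - x) s
    omega
  have hexit : ¬ (x + PySem.Int.floordiv (x0 - x) s * s + s ≤ x0) := by
    rw [hxs]
    have := PySem.Int.mod_lt (x0 - x) hstep
    omega
  rw [whileA_noop _ _ _ _ _ hexit, hxs]
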